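-- pv_equiv track=rewrite | github.com/gabrielcarioca/nanogram-solver | nonogram/strategies/overlap.py | overlap_fill_line
-- ===== SOURCE A (Python) =====
-- from typing import List
--
-- def overlap_fill_line(length: int, runs: List[int]) -> List[int]:
--     """
--     Compute the indices that are guaranteed filled for a single line using
--     the classic "overlap/core fill" logic (ignores any prior cell knowledge).
--
--     Parameters
--     ----------
--     length : int
--         Number of cells in the line.
--     runs : List[int]
--         Ordered run lengths for the line. Example: [3,1].
--
--     Returns
--     -------
--     List[int]
--         Sorted unique indices (0-based) that must be filled.
--         Empty if no overlap forces any cell.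
--
--     Notes
--     -----
--     Let L=length, k=len(runs), req=sum(runs)+(k-1), slack S=L-req.
--     For each run i:
--       earliest start  E[i]   = sum(runs[0..i-1]) + i
--       latest start    Lmax[i]= L - ( sum(runs[i..k-1]) + (k-1 - i) )
--       overlap length  OL[i]  = max(0, runs[i] - S)
--       If OL[i] > 0, the forced block is the intersection region between
--       the earliest end (E[i]+runs[i]-1) and the latest start (Lmax[i]),
--       which yields the contiguous indices [Lmax[i], E[i]+runs[i]-1].
--     """
--
--     if not runs:
--         return []
--
--     k = len(runs)
--     req = sum(runs) + (k - 1)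
--     S = length - req # slack
--     if S < 0:
--         # Impossible line
--         return []
--
--     # prefix sums of runs for fast range sums
--     pref = [0] * (k + 1)
--     for i in range(1, k + 1):
--         pref[i] = pref[i - 1] + runs[i - 1]
--
--     forced: List[int] = []
--
--     for i in range(k):
--         r = runs[i]
--         overlap_len = r - S
--         if overlap_len <= 0:
--             continue # No overlap cells
--
--         # Earliest start for run i (accounting for i gaps before it) - push everything as far left as possible
--         earliest_start = pref[i] + i
--
--         # Latest start for run i - push everythong as far right as possible
--         # sum(runs[i...k-1]) = pref[k] - pref[i]
--         # gaps after i = (k-1 - i)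
--         latest_start = length - ((pref[k] - pref[i]) + (k - 1 - i))
--
--         # Run i can slide between earliesst_start and latest_start (The slack S)
--
--         # Forced blocks runs from latest_start .. (earliest_start + r - 1)
--         start = latest_start
--         end = earliest_start + r - 1
--
--         if start <= end:
--             forced.extend(range(start, end + 1))
--
--
--     return sorted(set(forced))
-- ===== SOURCE B (Python) =====
-- def overlap_fill_line(length, runs):
--     # Mask intersection: build the leftmost packing and the rightmost packing
--     # as run-index masks over the line; a cell is forced iff both packings put
--     # the SAME run on it.  If no run is longer than the slack, nothing is forced.
--     if not runs:
--         return []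
--     slack = length - sum(runs) - (len(runs) - 1)
--     if slack < 0 or all(r <= slack for r in runs):
--         return []
--     left = [-1] * length
--     cur = 0
--     for i, r in enumerate(runs):
--         for j in range(cur, cur + r):
--             left[j] = i
--         cur += r + 1
--     right = [-1] * length
--     cur = length
--     for i in range(len(runs) - 1, -1, -1):
--         r = runs[i]
--         for j in range(cur - r, cur):
--             right[j] = i
--         cur -= r + 1
--     return [j for j in range(length) if left[j] != -1 and left[j] == right[j]]
-- ===== Notes on version B (the rewrite author's own statement) =====
-- stated objective: alternative
-- what changed: B replaces A's per-run interval arithmetic (prefix sums, earliest/latest start formulas, interval emission, sorted(set(...))) by two packing masks: after an early [] when no run exceeds the slack, it lays the runs leftmost and rightmost into two run-index arrays and collects, in one scan of the line, every cell on which both packings place the same run.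
-- outside the precondition, e.g. on overlap_fill_line(3, [-2, 3]): A returns [0, 1], B returns [0, 1, 2]; on overlap_fill_line(0, [-5, -6, 5, 1]): A returns [-7, -6, -5], B raises IndexError
import Mathlib
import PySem

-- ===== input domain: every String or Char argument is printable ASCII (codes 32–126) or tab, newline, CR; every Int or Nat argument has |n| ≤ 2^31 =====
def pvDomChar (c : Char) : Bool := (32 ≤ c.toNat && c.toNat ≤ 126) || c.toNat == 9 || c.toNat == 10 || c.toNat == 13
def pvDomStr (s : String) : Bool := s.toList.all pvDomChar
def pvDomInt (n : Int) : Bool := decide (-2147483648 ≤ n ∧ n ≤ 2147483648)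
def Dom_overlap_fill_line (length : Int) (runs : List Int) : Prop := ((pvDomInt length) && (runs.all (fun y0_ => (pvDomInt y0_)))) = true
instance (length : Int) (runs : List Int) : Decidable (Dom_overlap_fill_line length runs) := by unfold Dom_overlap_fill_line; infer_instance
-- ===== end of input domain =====

-- B replaces A's per-run interval arithmetic (prefix sums, earliest/latest-start formulas,
-- interval emission, sorted(set(...))) by two packing masks: lay the runs leftmost and
-- rightmost into two run-index arrays and scan the line once, keeping every cell on which
-- both packings place the same run (objective: alternative).

-- ===== PORT A =====
def overlap_fill_line (length : Int) (runs : List Int) : List Int :=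
  if runs = [] then []
  else
    let k : Int := (runs.length : Int)
    let req : Int := runs.sum + (k - 1)
    let S : Int := length - req
    if S < 0 then []
    else
      -- pref = [0]*(k+1); for i in range(1, k+1): pref[i] = pref[i-1] + runs[i-1]
      -- (List.set with i.toNat is exact here: the loop index i satisfies 1 ≤ i ≤ k)
      let pref := (PySem.List.pyRange 1 (k + 1)).foldl
        (fun pf i =>
          pf.set i.toNat (PySem.List.pyGetD pf (i - 1) 0 + PySem.List.pyGetD runs (i - 1) 0))
        (PySem.List.pyRepeat [(0 : Int)] (k + 1))
      let forced := (PySem.List.pyRange 0 k).foldl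
        (fun forced i =>
          let r := PySem.List.pyGetD runs i 0
          let overlap_len := r - S
          if overlap_len ≤ 0 then forced
          else
            let earliest_start := PySem.List.pyGetD pref i 0 + i
            let latest_start :=
              length - ((PySem.List.pyGetD pref k 0 - PySem.List.pyGetD pref i 0) + (k - 1 - i))
            let start := latest_start
            let stop := earliest_start + r - 1
            if start ≤ stop then forced ++ PySem.List.pyRange start (stop + 1) else forced)
        []
      PySem.List.sorted (PySem.Set.ofList forced) (fun x => x) false

-- ===== PORT B =====
def overlap_fill_line_alt (length : Int) (runs : List Int) : List Int :=
  if runs = [] then []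
  else
    let slack := length - runs.sum - ((runs.length : Int) - 1)
    if slack < 0 ∨ runs.all (fun r => decide (r ≤ slack)) then []
    else
    -- left = [-1]*length; for i, r in enumerate(runs): left[cur..cur+r-1] = i; cur += r+1
    -- (pySetD is Python's in-range item assignment; Pre_ guarantees every write is in range)
    let stL := (PySem.List.enumerate runs 0).foldl
      (fun (st : Int × List Int) p =>
        (st.1 + p.2 + 1,
         (PySem.List.pyRange st.1 (st.1 + p.2)).foldl
           (fun m j => PySem.List.pySetD m j p.1) st.2))
      (0, PySem.List.pyRepeat [(-1 : Int)] length)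
    let left := stL.2
    -- right = [-1]*length; for i in range(len(runs)-1, -1, -1): right[cur-r..cur-1] = i; cur -= r+1
    let stR := (PySem.List.pyRange ((runs.length : Int) - 1) (-1) (-1)).foldl
      (fun (st : Int × List Int) i =>
        let r := PySem.List.pyGetD runs i 0
        (st.1 - r - 1,
         (PySem.List.pyRange (st.1 - r) st.1).foldl
           (fun m j => PySem.List.pySetD m j i) st.2))
      (length, PySem.List.pyRepeat [(-1 : Int)] length)
    let right := stR.2
    (PySem.List.pyRange 0 length).filter
      (fun j => PySem.List.pyGetD left j 0 != -1 &&
                PySem.List.pyGetD left j 0 == PySem.List.pyGetD right j 0)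

-- ===== PRECONDITION & SPEC =====
-- Pre_ excludes only inputs with a negative run length whose slack is nonnegative and smaller
-- than some run (the cases that reach the mask building): outside the natural nonogram domain,
-- where A returns indices that are not even cells of the line (see the cited examples).
def Pre_overlap_fill_line (length : Int) (runs : List Int) : Prop :=
  (∀ r ∈ runs, 0 ≤ r) ∨ length - runs.sum - ((runs.length : Int) - 1) < 0 ∨
    (∀ r ∈ runs, r ≤ length - runs.sum - ((runs.length : Int) - 1))
instance (length : Int) (runs : List Int) : Decidable (Pre_overlap_fill_line length runs) := by unfold Pre_overlap_fill_line; infer_instance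

def pvWitness_overlap_fill_line : Int × List Int := (7, [3, 2])

def Spec_overlap_fill_line (length : Int) (runs : List Int) (out : List Int) : Prop := out = overlap_fill_line_alt length runs
instance (length : Int) (runs : List Int) (out : List Int) : Decidable (Spec_overlap_fill_line length runs out) := by unfold Spec_overlap_fill_line; infer_instance

-- ===== CLAIM (what is proved, stated in full; the proofs are below) =====
def Claim_equal_overlap_fill_line : Prop := ∀ (length : Int) (runs : List Int), Dom_overlap_fill_line length runs → Pre_overlap_fill_line length runs → Spec_overlap_fill_line length runs (overlap_fill_line length runs)

-- ===== LEMMAS AND PROOFS =====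

-- The common semantics: pvCore S e runs = the forced cells, runs packed from cursor e.
def pvCore (S : Int) : Int → List Int → List Int
  | _, [] => []
  | e, r :: rest =>
    (if S < r then PySem.List.pyRange (e + S) (e + r) else []) ++ pvCore S (e + r + 1) rest

-- pvIdx t e i0 j = index (counting from i0) of the run covering cell j when t is packed
-- consecutively from cursor e with single gaps; -1 if no run covers j.
def pvIdx : List Int → Int → Int → Int → Int
  | [], _, _, _ => -1
  | r :: t, e, i0, j => if e ≤ j ∧ j < e + r then i0 else pvIdx t (e + r + 1) (i0 + 1) j

theorem pvIdx_neg_of_lt (t : List Int) (e i0 j : Int)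
    (hpos : ∀ r ∈ t, 0 ≤ r) (hj : j < e) : pvIdx t e i0 j = -1 := by
  induction t generalizing e i0 with
  | nil => rfl
  | cons r s ih =>
    have hr : 0 ≤ r := hpos r (by simp)
    simp only [pvIdx, if_neg (by omega : ¬ (e ≤ j ∧ j < e + r))]
    exact ih (e + r + 1) (i0 + 1) (fun x hx => hpos x (by simp [hx])) (by omega)

theorem pvIdx_ge (t : List Int) (e i0 j : Int)
    (h : pvIdx t e i0 j ≠ -1) : i0 ≤ pvIdx t e i0 j := by
  induction t generalizing e i0 with
  | nil => simp [pvIdx] at h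
  | cons r s ih =>
    simp only [pvIdx] at h ⊢
    split_ifs with hc
    · omega
    · rw [if_neg hc] at h
      have := ih (e + r + 1) (i0 + 1) h
      omega

theorem pvIdx_append (m : List Int) (r e i0 j : Int) (hi0 : 0 ≤ i0) :
    pvIdx (m ++ [r]) e i0 j =
      if pvIdx m e i0 j = -1 then
        (if e + m.sum + (m.length : Int) ≤ j ∧ j < e + m.sum + (m.length : Int) + r
         then i0 + m.length else -1)
      else pvIdx m e i0 j := by
  induction m generalizing e i0 with
  | nil => simp [pvIdx]
  | cons a s ih =>
    by_cases hc : e ≤ j ∧ j < e + a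
    · simp only [List.cons_append, pvIdx, if_pos hc, if_neg (show ¬ i0 = -1 by omega)]
    · simp only [List.cons_append, pvIdx, if_neg hc]
      rw [ih (e + a + 1) (i0 + 1) (by omega)]
      simp only [List.sum_cons, List.length_cons]
      push_cast
      split_ifs <;> first | rfl | omega

-- set over a contiguous range of indices: length is preserved …
theorem pvSetFold_length (v : Int) (l : List Int) (m : List Int) :
    (l.foldl (fun m j => PySem.List.pySetD m j v) m).length = m.length := by
  induction l generalizing m with
  | nil => rfl
  | cons a t ih =>
    rw [List.foldl_cons, ih]
    simp [PySem.List.length_pySetD]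

-- … and reads see the written value exactly on the range.
theorem pvSetRange_getD (v : Int) : ∀ (n : Nat) (a b : Int) (m : List Int),
    (b - a).toNat = n → 0 ≤ a → b ≤ (m.length : Int) → ∀ j : Int, 0 ≤ j →
    PySem.List.pyGetD ((PySem.List.pyRange a b).foldl (fun m j => PySem.List.pySetD m j v) m) j 0
      = if a ≤ j ∧ j < b then v else PySem.List.pyGetD m j 0 := by
  intro n
  induction n with
  | zero =>
    intro a b m hn ha hb j hj
    rw [PySem.List.pyRange_one_eq_nil (by omega), List.foldl_nil, if_neg (by omega)]
  | succ p ih =>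
    intro a b m hn ha hb j hj
    have hab : a < b := by omega
    rw [PySem.List.pyRange_one_cons hab, List.foldl_cons]
    rw [ih (a + 1) b (PySem.List.pySetD m a v) (by omega) (by omega)
      (by rw [PySem.List.length_pySetD]; exact hb) j hj]
    have hset : PySem.List.pyGetD (PySem.List.pySetD m a v) j 0
        = if j = a then v else PySem.List.pyGetD m j 0 := by
      rw [PySem.List.pySetD_of_nonneg _ _ ha,
        PySem.List.pyGetD_of_nonneg _ _ hj, PySem.List.pyGetD_of_nonneg _ _ hj]
      rcases eq_or_ne j a with h | h
      · subst h
        rw [if_pos rfl]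
        have hlt : j.toNat < m.length := by omega
        rw [List.getD_eq_getElem?_getD, List.getElem?_set_self (by simpa using hlt)]
        rfl
      · rw [if_neg h, List.getD_eq_getElem?_getD, List.getD_eq_getElem?_getD,
          List.getElem?_set_ne (by omega)]
    rw [hset]
    split_ifs <;> first | rfl | omega

-- sums of nonnegative run lists are nonnegative
theorem pvSum_nonneg (t : List Int) (hpos : ∀ r ∈ t, 0 ≤ r) : 0 ≤ t.sum :=
  List.sum_nonneg hpos

-- Characterisation of B's LEFT packing loop.
theorem pvLeft_char (t : List Int) : ∀ (s e : Int) (m : List Int),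
    (∀ r ∈ t, 0 ≤ r) → 0 ≤ s → 0 ≤ e → e + t.sum + (t.length : Int) ≤ (m.length : Int) + 1 →
    ∀ j : Int, 0 ≤ j →
    PySem.List.pyGetD
      (((PySem.List.enumerate t s).foldl
        (fun (st : Int × List Int) p =>
          (st.1 + p.2 + 1,
           (PySem.List.pyRange st.1 (st.1 + p.2)).foldl
             (fun m j => PySem.List.pySetD m j p.1) st.2))
        (e, m)).2) j 0
      = if pvIdx t e s j = -1 then PySem.List.pyGetD m j 0 else pvIdx t e s j := by
  induction t with
  | nil =>
    intro s e m _ _ _ _ j hj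
    simp [PySem.List.enumerate_nil, pvIdx]
  | cons r t ih =>
    intro s e m hpos hs he hub j hj
    have hr : 0 ≤ r := hpos r (by simp)
    have hts : 0 ≤ t.sum := pvSum_nonneg t (fun x hx => hpos x (by simp [hx]))
    have hsum : (r :: t).sum = r + t.sum := by simp
    have hlen : ((r :: t).length : Int) = (t.length : Int) + 1 := by simp
    rw [hsum, hlen] at hub
    rw [PySem.List.enumerate_cons, List.foldl_cons]
    have hlen' : ((PySem.List.pyRange e (e + r)).foldl
        (fun m j => PySem.List.pySetD m j s) m).length = m.length := pvSetFold_length s _ m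
    rw [ih (s + 1) (e + r + 1) _ (fun x hx => hpos x (by simp [hx])) (by omega) (by omega)
      (by rw [hlen']; omega) j hj]
    have hmask := pvSetRange_getD s ((e + r - e).toNat) e (e + r) m rfl he (by omega) j hj
    simp only [pvIdx]
    by_cases hc : e ≤ j ∧ j < e + r
    · rw [pvIdx_neg_of_lt t (e + r + 1) (s + 1) j (fun x hx => hpos x (by simp [hx])) (by omega)]
      rw [if_pos rfl, hmask, if_pos hc, if_pos hc, if_neg (show ¬ s = -1 by omega)]
    · rw [if_neg hc]
      by_cases hm : pvIdx t (e + r + 1) (s + 1) j = -1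
      · rw [if_pos hm, if_pos hm, hmask, if_neg hc]
      · rw [if_neg hm, if_neg hm]

-- Characterisation of B's RIGHT packing loop (reverse induction on the runs).
theorem pvRight_char (t : List Int) : ∀ (c : Int) (m : List Int),
    (∀ r ∈ t, 0 ≤ r) → 0 ≤ c - t.sum - (t.length : Int) + 1 → c ≤ (m.length : Int) →
    ∀ j : Int, 0 ≤ j →
    PySem.List.pyGetD
      (((PySem.List.pyRange ((t.length : Int) - 1) (-1) (-1)).foldl
        (fun (st : Int × List Int) i =>
          (st.1 - PySem.List.pyGetD t i 0 - 1,
           (PySem.List.pyRange (st.1 - PySem.List.pyGetD t i 0) st.1).foldl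
             (fun m j => PySem.List.pySetD m j i) st.2))
        (c, m)).2) j 0
      = if pvIdx t (c - t.sum - (t.length : Int) + 1) 0 j = -1 then PySem.List.pyGetD m j 0
        else pvIdx t (c - t.sum - (t.length : Int) + 1) 0 j := by
  induction t using List.reverseRecOn with
  | nil =>
    intro c m _ _ _ j hj
    rw [PySem.List.pyRange_neg_one_eq_nil (by norm_num), List.foldl_nil]
    simp [pvIdx]
  | append_singleton t r ih =>
    intro c m hpos hlb hub j hj
    have hr : 0 ≤ r := hpos r (by simp)
    have hpos' : ∀ x ∈ t, 0 ≤ x := fun x hx => hpos x (by simp [hx])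
    have hts : 0 ≤ t.sum := pvSum_nonneg t hpos'
    have hsum : (t ++ [r]).sum = t.sum + r := by simp
    have hlen : ((t ++ [r]).length : Int) = (t.length : Int) + 1 := by simp
    rw [hsum, hlen] at hlb
    have hrange : PySem.List.pyRange (((t ++ [r]).length : Int) - 1) (-1) (-1)
        = ((t.length : Int)) :: PySem.List.pyRange ((t.length : Int) - 1) (-1) (-1) := by
      rw [hlen, show (t.length : Int) + 1 - 1 = (t.length : Int) from by ring]
      exact PySem.List.pyRange_neg_one_cons (by omega)
    rw [hrange, List.foldl_cons]
    have hget : PySem.List.pyGetD (t ++ [r]) ((t.length : Int)) 0 = r := by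
      rw [PySem.List.pyGetD_natCast, List.getD_eq_getElem?_getD, List.getElem?_concat_length]
      rfl
    simp only [hget]
    -- the remaining iterations only read indices 0 .. t.length-1, where t ++ [r] agrees with t
    rw [PySem.List.foldl_congr_mem _ _
      (fun (st : Int × List Int) i =>
        (st.1 - PySem.List.pyGetD t i 0 - 1,
         (PySem.List.pyRange (st.1 - PySem.List.pyGetD t i 0) st.1).foldl
           (fun m j => PySem.List.pySetD m j i) st.2)) _
      (by
        intro acc x hx
        have hx' := (PySem.List.mem_pyRange_neg_one).mp hx
        have h0x : 0 ≤ x := by omega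
        have hxl : x.toNat < t.length := by omega
        have hagree : PySem.List.pyGetD (t ++ [r]) x 0 = PySem.List.pyGetD t x 0 := by
          rw [PySem.List.pyGetD_eq_getElem _ _ h0x (by simp; omega),
            PySem.List.pyGetD_eq_getElem _ _ h0x (by omega),
            List.getElem_append_left hxl]
        rw [hagree])]
    have hlenm : ((PySem.List.pyRange (c - r) c).foldl
        (fun m j => PySem.List.pySetD m j ((t.length : Int))) m).length = m.length :=
      pvSetFold_length _ _ m
    rw [ih (c - r - 1) _ hpos' (by omega) (by rw [hlenm]; omega) j hj]
    have hmask := pvSetRange_getD ((t.length : Int)) ((c - (c - r)).toNat) (c - r) c m rfl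
      (by omega) hub j hj
    have hbase : c - r - 1 - t.sum - (t.length : Int) + 1
        = c - (t.sum + r) - ((t.length : Int) + 1) + 1 := by ring
    rw [hbase, hsum, hlen] at *
    set e := c - (t.sum + r) - ((t.length : Int) + 1) + 1 with he
    rw [pvIdx_append t r e 0 j (by norm_num)]
    have heq1 : e + t.sum + (t.length : Int) = c - r := by omega
    have heq2 : e + t.sum + (t.length : Int) + r = c := by omega
    rw [heq1, show c - r + r = c from by ring]
    by_cases hm : pvIdx t e 0 j = -1
    · rw [if_pos hm, if_pos hm, hmask]
      by_cases hc2 : c - r ≤ j ∧ j < c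
      · rw [if_pos hc2, if_pos hc2, if_neg (by omega : ¬ (0 : Int) + t.length = -1)]
        ring
      · rw [if_neg hc2, if_neg hc2, if_pos rfl]
    · rw [if_neg hm, if_neg hm]
      have := pvIdx_ge t e 0 j hm
      rw [if_neg (by omega)]

-- lower / upper bounds for pvCore and its strict sortedness
theorem pvCore_lb (t : List Int) : ∀ (S e x : Int), (∀ r ∈ t, 0 ≤ r) → 0 ≤ S →
    x ∈ pvCore S e t → e + S ≤ x := by
  induction t with
  | nil => intro S e x _ _ h; simp [pvCore] at h
  | cons r t ih =>
    intro S e x hpos hS h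
    have hr : 0 ≤ r := hpos r (by simp)
    simp only [pvCore, List.mem_append] at h
    rcases h with h | h
    · split_ifs at h with hc
      · exact ((PySem.List.mem_pyRange_one).mp h).1
      · simp at h
    · have := ih S (e + r + 1) x (fun y hy => hpos y (by simp [hy])) hS h
      omega

theorem pvCore_ub (t : List Int) : ∀ (S e x : Int), (∀ r ∈ t, 0 ≤ r) →
    x ∈ pvCore S e t → x < e + t.sum + (t.length : Int) - 1 := by
  induction t with
  | nil => intro S e x _ h; simp [pvCore] at h
  | cons r t ih =>
    intro S e x hpos h
    have hr : 0 ≤ r := hpos r (by simp)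
    have hts : 0 ≤ t.sum := pvSum_nonneg t (fun y hy => hpos y (by simp [hy]))
    simp only [pvCore, List.mem_append] at h
    have hsum : (r :: t).sum = r + t.sum := by simp
    have hlen : ((r :: t).length : Int) = (t.length : Int) + 1 := by simp
    rw [hsum, hlen]
    rcases h with h | h
    · split_ifs at h with hc
      · have := ((PySem.List.mem_pyRange_one).mp h).2
        omega
      · simp at h
    · have := ih S (e + r + 1) x (fun y hy => hpos y (by simp [hy])) h
      omega

theorem pvCore_pairwise (t : List Int) : ∀ (S e : Int), (∀ r ∈ t, 0 ≤ r) → 0 ≤ S →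
    (pvCore S e t).Pairwise (· < ·) := by
  induction t with
  | nil => intro S e _ _; simp [pvCore]
  | cons r t ih =>
    intro S e hpos hS
    have hpos' : ∀ y ∈ t, 0 ≤ y := fun y hy => hpos y (by simp [hy])
    simp only [pvCore]
    rw [List.pairwise_append]
    refine ⟨?_, ih S (e + r + 1) hpos' hS, ?_⟩
    · split_ifs
      · exact PySem.List.pairwise_lt_pyRange_one _ _
      · simp
    · intro x hx y hy
      have hylb := pvCore_lb t S (e + r + 1) y hpos' hS hy
      split_ifs at hx with hc
      · have := ((PySem.List.mem_pyRange_one).mp hx).2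
        omega
      · simp at hx

-- cells where both packings carry the same run index are exactly pvCore
theorem pvAgree (t : List Int) : ∀ (S e i0 j : Int), (∀ r ∈ t, 0 ≤ r) → 0 ≤ S → 0 ≤ i0 →
    ((pvIdx t e i0 j ≠ -1 ∧ pvIdx t e i0 j = pvIdx t (e + S) i0 j) ↔ j ∈ pvCore S e t) := by
  induction t with
  | nil => intro S e i0 j _ _ _; simp [pvIdx, pvCore]
  | cons r t ih =>
    intro S e i0 j hpos hS hi0
    have hr : 0 ≤ r := hpos r (by simp)
    have hpos' : ∀ y ∈ t, 0 ≤ y := fun y hy => hpos y (by simp [hy])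
    simp only [pvIdx, pvCore, List.mem_append]
    by_cases h1 : e ≤ j ∧ j < e + r
    · rw [if_pos h1]
      by_cases h2 : e + S ≤ j ∧ j < e + S + r
      · rw [if_pos h2]
        constructor
        · intro _
          left
          rw [if_pos (by omega : S < r)]
          exact (PySem.List.mem_pyRange_one).mpr (by omega)
        · intro _; exact ⟨by omega, rfl⟩
      · -- j < e + S: right packing has nothing at j
        have hj2 : j < e + S := by omega
        rw [if_neg h2, pvIdx_neg_of_lt t (e + S + r + 1) (i0 + 1) j hpos' (by omega)]
        constructor
        · rintro ⟨hne, heq⟩; omega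
        · rintro (h | h)
          · split_ifs at h with hc
            · have := ((PySem.List.mem_pyRange_one).mp h).1
              omega
            · simp at h
          · have := pvCore_lb t S (e + r + 1) j hpos' hS h
            omega
    · rw [if_neg h1]
      by_cases h2 : e + S ≤ j ∧ j < e + S + r
      · -- j ≥ e + r: left packing's tail value ≥ i0+1 ≠ i0, or -1
        rw [if_pos h2]
        constructor
        · rintro ⟨hne, heq⟩
          have := pvIdx_ge t (e + r + 1) (i0 + 1) j hne
          omega
        · rintro (h | h)
          · split_ifs at h with hc
            · have := ((PySem.List.mem_pyRange_one).mp h).2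
              omega
            · simp at h
          · have := pvCore_lb t S (e + r + 1) j hpos' hS h
            omega
      · rw [if_neg h2]
        have hshift : e + S + r + 1 = (e + r + 1) + S := by ring
        rw [hshift]
        rw [ih S (e + r + 1) (i0 + 1) j hpos' hS (by omega)]
        constructor
        · intro h; right; exact h
        · rintro (h | h)
          · split_ifs at h with hc
            · have hm := (PySem.List.mem_pyRange_one).mp h
              omega
            · simp at h
          · exact h

-- ===== A-side reduction (prefix table and per-run loop → pvCore) =====
theorem pvPref_fold (runs : List Int) (j : Nat) (hj : j ≤ runs.length) :
    (PySem.List.pyRange 1 ((j : Int) + 1)).foldl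
      (fun pf i =>
        pf.set i.toNat (PySem.List.pyGetD pf (i - 1) 0 + PySem.List.pyGetD runs (i - 1) 0))
      (PySem.List.pyRepeat [(0 : Int)] ((runs.length : Int) + 1)) =
    (List.range (runs.length + 1)).map
      (fun t => if t ≤ j then ((runs.take t).sum : Int) else 0) := by
  induction j with
  | zero =>
    have h0 : PySem.List.pyRange 1 (((0 : Nat) : Int) + 1) = [] := by norm_num
    rw [h0, List.foldl_nil, PySem.List.pyRepeat_singleton]
    have hrep : ((runs.length : Int) + 1).toNat = runs.length + 1 := by omega
    rw [hrep]
    apply List.ext_getElem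
    · simp
    · intro i hi1 hi2
      simp only [List.getElem_replicate, List.getElem_map, List.getElem_range]
      split_ifs with h
      · interval_cases i
        simp
      · rfl
  | succ n ih =>
    have hn : n ≤ runs.length := Nat.le_of_succ_le hj
    have hpeel : PySem.List.pyRange 1 (((n + 1 : Nat) : Int) + 1) =
        PySem.List.pyRange 1 ((n : Int) + 1) ++ [(n : Int) + 1] := by
      have := PySem.List.pyRange_one_succ_right (a := 1) (b := (n : Int) + 1) (by omega)
      push_cast
      rw [← this]
    rw [hpeel, List.foldl_append, ih hn]
    simp only [List.foldl_cons, List.foldl_nil]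
    have htn : ((n : Int) + 1).toNat = n + 1 := by omega
    have hg1 : PySem.List.pyGetD ((List.range (runs.length + 1)).map
        (fun t => if t ≤ n then ((runs.take t).sum : Int) else 0)) ((n : Int) + 1 - 1) 0
        = (runs.take n).sum := by
      have : (n : Int) + 1 - 1 = ((n : Nat) : Int) := by ring
      rw [this, PySem.List.pyGetD_natCast]
      rw [List.getD_eq_getElem?_getD]
      simp [Nat.lt_succ_of_le hn]
    have hg2 : PySem.List.pyGetD runs ((n : Int) + 1 - 1) 0 = runs[n]'(by omega) := by
      have : (n : Int) + 1 - 1 = ((n : Nat) : Int) := by ring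
      rw [this, PySem.List.pyGetD_natCast, List.getD_eq_getElem?_getD]
      simp [List.getElem?_eq_getElem (by omega : n < runs.length)]
    rw [hg1, hg2, htn]
    apply List.ext_getElem
    · simp
    · intro i hi1 hi2
      simp only [List.getElem_set, List.getElem_map, List.getElem_range]
      simp only [List.length_set, List.length_map, List.length_range] at hi1
      by_cases hie : n + 1 = i
      · subst hie
        rw [List.sum_take_succ runs n (by omega)]
        split_ifs <;> first | rfl | omega
      · rw [if_neg hie]
        split_ifs <;> first | rfl | omega

-- A's second loop body, with the prefix table replaced by its value (pvPref_fold).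
def pvAbody (L S : Int) (runs : List Int) (forced : List Int) (i : Int) : List Int :=
  let r := PySem.List.pyGetD runs i 0
  let overlap_len := r - S
  if overlap_len ≤ 0 then forced
  else
    let earliest_start :=
      PySem.List.pyGetD ((List.range (runs.length + 1)).map
        (fun t => ((runs.take t).sum : Int))) i 0 + i
    let latest_start :=
      L - ((PySem.List.pyGetD ((List.range (runs.length + 1)).map
        (fun t => ((runs.take t).sum : Int))) ((runs.length : Int)) 0 -
        PySem.List.pyGetD ((List.range (runs.length + 1)).map
          (fun t => ((runs.take t).sum : Int))) i 0) + ((runs.length : Int) - 1 - i))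
    let start := latest_start
    let stop := earliest_start + r - 1
    if start ≤ stop then forced ++ PySem.List.pyRange start (stop + 1) else forced

theorem pvAbody_eval (L S : Int) (runs : List Int)
    (hS : S = L - runs.sum - ((runs.length : Int) - 1))
    (j : Nat) (hjlt : j < runs.length) (acc : List Int) :
    pvAbody L S runs acc (j : Int) =
      acc ++ (if S < runs[j]'hjlt then
        PySem.List.pyRange (((runs.take j).sum : Int) + j + S)
          (((runs.take j).sum : Int) + j + runs[j]'hjlt) else []) := by
  have hr : PySem.List.pyGetD runs (j : Int) 0 = runs[j]'hjlt := by
    rw [PySem.List.pyGetD_natCast, List.getD_eq_getElem?_getD]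
    simp [List.getElem?_eq_getElem hjlt]
  have hpj : PySem.List.pyGetD ((List.range (runs.length + 1)).map
      (fun t => ((runs.take t).sum : Int))) (j : Int) 0 = (runs.take j).sum := by
    rw [PySem.List.pyGetD_natCast, List.getD_eq_getElem?_getD]
    simp [Nat.lt_succ_of_le (le_of_lt hjlt)]
  have hpk : PySem.List.pyGetD ((List.range (runs.length + 1)).map
      (fun t => ((runs.take t).sum : Int))) ((runs.length : Nat) : Int) 0 = runs.sum := by
    rw [PySem.List.pyGetD_natCast, List.getD_eq_getElem?_getD]
    simp
  unfold pvAbody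
  simp only [hr, hpj, hpk]
  by_cases hb : S < runs[j]'hjlt
  · rw [if_neg (by omega)]
    have hlat : L - ((runs.sum - (runs.take j).sum) + ((runs.length : Int) - 1 - (j : Int)))
        = ((runs.take j).sum + (j : Int)) + S := by rw [hS]; ring
    rw [hlat, if_pos (by omega), if_pos hb]
    have hstop : ((runs.take j).sum + (j : Int)) + runs[j]'hjlt - 1 + 1
        = ((runs.take j).sum + (j : Int)) + runs[j]'hjlt := by ring
    rw [hstop]
  · rw [if_pos (by omega), if_neg hb, List.append_nil]

theorem pvA_fold (L S : Int) (runs : List Int)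
    (hS : S = L - runs.sum - ((runs.length : Int) - 1)) :
    ∀ (fuel j : Nat), runs.length - j = fuel → j ≤ runs.length → ∀ (acc : List Int),
    (PySem.List.pyRange (j : Int) (runs.length : Int)).foldl
      (fun forced i => pvAbody L S runs forced i) acc =
    acc ++ pvCore S (((runs.take j).sum : Int) + j) (runs.drop j) := by
  intro fuel
  induction fuel with
  | zero =>
    intro j hf hj acc
    have hjl : j = runs.length := by omega
    have hnil : PySem.List.pyRange (j : Int) (runs.length : Int) = [] := by
      rw [hjl]; simp [PySem.List.pyRange]
    rw [hnil]
    rw [hjl]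
    simp [pvCore, List.drop_length]
  | succ m ih =>
    intro j hf hj acc
    have hjlt : j < runs.length := by omega
    rw [PySem.List.pyRange_one_cons (by exact_mod_cast hjlt), List.foldl_cons]
    simp only [pvAbody_eval L S runs hS j hjlt]
    have hcast : ((j : Int) + 1) = (((j + 1 : Nat)) : Int) := by push_cast; ring
    rw [hcast, ih (j + 1) (by omega) (by omega)]
    rw [List.drop_eq_getElem_cons hjlt]
    have hE1 : ((runs.take (j+1)).sum : Int) + ((j+1 : Nat) : Int)
        = ((runs.take j).sum : Int) + (j : Int) + runs[j]'hjlt + 1 := by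
      rw [List.sum_take_succ runs j hjlt]; push_cast; ring
    rw [hE1]
    simp only [pvCore, List.append_assoc]

-- A reduces to sorted(set(pvCore))
theorem pvA_eq_core (L : Int) (runs : List Int) (h0 : runs ≠ [])
    (h1 : ¬ L - (runs.sum + ((runs.length : Int) - 1)) < 0) :
    overlap_fill_line L runs
      = PySem.List.sorted
          (PySem.Set.ofList (pvCore (L - runs.sum - ((runs.length : Int) - 1)) 0 runs))
          (fun x => x) false := by
  simp only [overlap_fill_line, if_neg h0]
  rw [if_neg h1]
  rw [pvPref_fold runs runs.length (le_refl _)]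
  rw [show (List.range (runs.length + 1)).map
        (fun t => if t ≤ runs.length then ((runs.take t).sum : Int) else 0)
      = (List.range (runs.length + 1)).map (fun t => ((runs.take t).sum : Int)) from
    List.map_congr_left (fun t ht => by
      rw [if_pos (Nat.lt_succ_iff.mp (List.mem_range.mp ht))])]
  have hA := pvA_fold L (L - (runs.sum + ((runs.length : Int) - 1))) runs (by ring)
    runs.length 0 (by omega) (by omega) []
  simp only [pvAbody, Nat.cast_zero, List.take_zero, List.sum_nil, List.drop_zero,
    add_zero, List.nil_append] at hA
  rw [hA]
  rw [show L - (runs.sum + ((runs.length : Int) - 1))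
        = L - runs.sum - ((runs.length : Int) - 1) from by ring]

-- if no run exceeds the slack, no cell is forced
theorem pvCore_nil_of_all_le (t : List Int) : ∀ (S e : Int), (∀ r ∈ t, r ≤ S) → pvCore S e t = [] := by
  induction t with
  | nil => intro S e _; rfl
  | cons r s ih =>
    intro S e h
    have hr : r ≤ S := h r (by simp)
    simp only [pvCore, if_neg (by omega : ¬ S < r), List.nil_append]
    exact ih S (e + r + 1) (fun x hx => h x (by simp [hx]))

-- a strictly increasing list is its own sorted(set(…))
theorem pvSortedSet_eq (l : List Int) (h : l.Pairwise (· < ·)) :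
    PySem.List.sorted (PySem.Set.ofList l) (fun x => x) false = l := by
  have hnd : l.Nodup := h.imp (fun {a b} hab => ne_of_lt hab)
  have e1 : PySem.Set.ofList l = l := PySem.Set.ofList_eq_self_of_nodup l hnd
  rw [e1]
  exact PySem.List.sorted_eq_self_of_pairwise l _ (h.imp (fun {a b} hab => le_of_lt hab))

-- filtering the line by membership in a strictly increasing in-range list gives that list
theorem pvFilter_range_eq (l : List Int) (L : Int) (hpw : l.Pairwise (· < ·))
    (hb : ∀ x ∈ l, 0 ≤ x ∧ x < L) :
    (PySem.List.pyRange 0 L).filter (fun j => decide (j ∈ l)) = l := by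
  have hF : ((PySem.List.pyRange 0 L).filter (fun j => decide (j ∈ l))).Pairwise (· < ·) :=
    (PySem.List.pairwise_lt_pyRange_one 0 L).filter _
  have hmem : ∀ x, x ∈ (PySem.List.pyRange 0 L).filter (fun j => decide (j ∈ l)) ↔ x ∈ l := by
    intro x
    rw [List.mem_filter, PySem.List.mem_pyRange_one]
    constructor
    · rintro ⟨_, hx⟩; simpa using hx
    · intro hx
      exact ⟨⟨(hb x hx).1, (hb x hx).2⟩, by simpa using hx⟩
  have hperm : l.Perm ((PySem.List.pyRange 0 L).filter (fun j => decide (j ∈ l))) := by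
    rw [List.perm_ext_iff_of_nodup (hpw.imp (fun {a b} hab => ne_of_lt hab))
      (hF.imp (fun {a b} hab => ne_of_lt hab))]
    intro a
    exact (hmem a).symm
  have h2 := PySem.List.sorted_eq_of_perm_of_pairwise_lt
    ((PySem.List.pyRange 0 L).filter (fun j => decide (j ∈ l))) l (fun x => x) hperm hpw
  have h3 := PySem.List.sorted_eq_self_of_pairwise
    ((PySem.List.pyRange 0 L).filter (fun j => decide (j ∈ l))) (fun x => x)
    (hF.imp (fun {a b} hab => le_of_lt hab))
  exact h3.symm.trans h2

-- B reduces to pvCore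
theorem pvB_eq_core (L : Int) (runs : List Int) (h0 : runs ≠ [])
    (hpos : ∀ r ∈ runs, 0 ≤ r)
    (h1 : ¬ L < runs.sum + ((runs.length : Int) - 1)) :
    overlap_fill_line_alt L runs = pvCore (L - runs.sum - ((runs.length : Int) - 1)) 0 runs := by
  have hk1 : 1 ≤ runs.length := List.length_pos_iff.mpr h0
  have hsum : 0 ≤ runs.sum := pvSum_nonneg runs hpos
  have hL0 : 0 ≤ L := by
    have : (1 : Int) ≤ (runs.length : Int) := by exact_mod_cast hk1
    omega
  set S : Int := L - runs.sum - ((runs.length : Int) - 1) with hSdef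
  have hS : 0 ≤ S := by omega
  simp only [overlap_fill_line_alt, if_neg h0]
  by_cases hall : ∀ r ∈ runs, r ≤ S
  case pos =>
    rw [if_pos (Or.inr (List.all_eq_true.mpr (fun r hr => decide_eq_true (hall r hr))))]
    exact (pvCore_nil_of_all_le runs S 0 hall).symm
  rw [if_neg (fun h => h.elim (fun hlt => absurd hlt (by omega))
    (fun hb => hall (fun r hr => of_decide_eq_true (List.all_eq_true.mp hb r hr))))]
  have hrep : (PySem.List.pyRepeat [(-1 : Int)] L).length = L.toNat := by
    rw [PySem.List.pyRepeat_singleton, List.length_replicate]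
  have hrepl : ((PySem.List.pyRepeat [(-1 : Int)] L).length : Int) = L := by
    rw [hrep]; omega
  have hrepget : ∀ j : Int, 0 ≤ j → j < L →
      PySem.List.pyGetD (PySem.List.pyRepeat [(-1 : Int)] L) j 0 = -1 := by
    intro j hj hjL
    rw [PySem.List.pyRepeat_singleton, PySem.List.pyGetD_of_nonneg _ _ hj,
      List.getD_eq_getElem?_getD, List.getElem?_replicate]
    rw [if_pos (by omega : j.toNat < L.toNat)]
    rfl
  have hleft := pvLeft_char runs 0 0 (PySem.List.pyRepeat [(-1 : Int)] L) hpos (le_refl 0)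
    (le_refl 0) (by rw [hrepl]; omega)
  have hright := pvRight_char runs L (PySem.List.pyRepeat [(-1 : Int)] L) hpos
    (by omega) (by rw [hrepl])
  have hbase : L - runs.sum - (runs.length : Int) + 1 = S := by omega
  rw [List.filter_congr (l := PySem.List.pyRange 0 L)
    (q := fun j => decide (j ∈ pvCore S 0 runs)) ?_]
  · exact pvFilter_range_eq (pvCore S 0 runs) L
      (pvCore_pairwise runs S 0 hpos hS)
      (fun x hx => ⟨by have := pvCore_lb runs S 0 x hpos hS hx; omega,
        by have := pvCore_ub runs S 0 x hpos hx; omega⟩)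
  · intro j hj
    have hjr := (PySem.List.mem_pyRange_one).mp hj
    rw [hleft j hjr.1, hright j hjr.1]
    rw [hbase]
    have hLval : (if pvIdx runs 0 0 j = -1
        then PySem.List.pyGetD (PySem.List.pyRepeat [(-1 : Int)] L) j 0
        else pvIdx runs 0 0 j) = pvIdx runs 0 0 j := by
      split_ifs with h
      · rw [hrepget j hjr.1 hjr.2, h]
      · rfl
    have hRval : (if pvIdx runs S 0 j = -1
        then PySem.List.pyGetD (PySem.List.pyRepeat [(-1 : Int)] L) j 0
        else pvIdx runs S 0 j) = pvIdx runs S 0 j := by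
      split_ifs with h
      · rw [hrepget j hjr.1 hjr.2, h]
      · rfl
    rw [hLval, hRval]
    have hag := pvAgree runs S 0 0 j hpos hS (le_refl 0)
    rw [zero_add] at hag
    by_cases hmem : j ∈ pvCore S 0 runs
    · obtain ⟨hne, heq⟩ := hag.mpr hmem
      have hne' : ¬ pvIdx runs S 0 j = -1 := heq ▸ hne
      simp [hmem, bne_iff_ne, heq, hne']
    · by_cases hne : pvIdx runs 0 0 j = -1
      · simp [hmem, hne]
      · have hneq : ¬ pvIdx runs 0 0 j = pvIdx runs S 0 j :=
          fun he => hmem (hag.mp ⟨hne, he⟩)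
        simp [hmem, bne_iff_ne, hne, hneq]

theorem pvAB_eq (L : Int) (runs : List Int)
    (hpre : (∀ r ∈ runs, 0 ≤ r) ∨ L - runs.sum - ((runs.length : Int) - 1) < 0 ∨
      (∀ r ∈ runs, r ≤ L - runs.sum - ((runs.length : Int) - 1))) :
    overlap_fill_line L runs = overlap_fill_line_alt L runs := by
  by_cases h0 : runs = []
  · simp [overlap_fill_line, overlap_fill_line_alt, h0]
  · by_cases h1 : L - (runs.sum + ((runs.length : Int) - 1)) < 0
    · simp only [overlap_fill_line, overlap_fill_line_alt, if_neg h0]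
      rw [if_pos h1, if_pos (Or.inl (by omega : L - runs.sum - ((runs.length : Int) - 1) < 0))]
    · by_cases hall : ∀ r ∈ runs, r ≤ L - runs.sum - ((runs.length : Int) - 1)
      · rw [pvA_eq_core L runs h0 h1, pvCore_nil_of_all_le runs _ 0 hall]
        simp only [overlap_fill_line_alt, if_neg h0]
        rw [if_pos (Or.inr (List.all_eq_true.mpr (fun r hr => decide_eq_true (hall r hr))))]
        rfl
      · have hpos : ∀ r ∈ runs, 0 ≤ r := by
          rcases hpre with h | h | h
          · exact h
          · omega
          · exact absurd h hall
        rw [pvA_eq_core L runs h0 h1, pvB_eq_core L runs h0 hpos (by omega)]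
        exact pvSortedSet_eq _ (pvCore_pairwise runs _ 0 hpos (by omega))

-- ===== VERDICT (by name: the statement is the Claim_ definition above) =====
theorem overlap_fill_line_spec : Claim_equal_overlap_fill_line := by
  intro L runs _ hpre
  unfold Spec_overlap_fill_line
  unfold Pre_overlap_fill_line at hpre
  exact pvAB_eq L runs hpre
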